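-- pv_equiv track=rewrite | github.com/elkhayari/puf_backend | puf_server/utils/PUFProcessor.py | calculate_ones_and_zeros_initialValue
-- ===== SOURCE A (Python) =====
-- def calculate_ones_and_zeros_initialValue(response, initialValue):
--     """ Parses the 8-bit values stored in the measurement array and returns the number of zeros and ones.
--
--     :param response:
--     :return:
--     """
--     ones = 0
--     zeros = 0
--     gaps = 0
--     for x in response:
--         if x == int(initialValue.replace('0x', ''), 16):
--             ones = ones + 1
--         elif x == -1:
--             gaps = gaps + 1
--         else:
--             zeros = zeros + 1
--     '''ones = sum(1 for x in response if x == int(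
--         initialValue.replace('0x', ''), 16))
--     zeros = sum(1 for x in response if x != int(
--         initialValue.replace('0x', ''), 16))'''
--     return ones, zeros, gaps
-- ===== SOURCE B (Python) =====
-- def calculate_ones_and_zeros_initialValue(response, initialValue):
--     target = int(initialValue.replace('0x', ''), 16)
--     c = {}
--     for x in response:
--         c[x] = c.get(x, 0) + 1
--     ones = c.get(target, 0)
--     gaps = 0 if target == -1 else c.get(-1, 0)
--     zeros = len(response) - ones - gaps
--     return ones, zeros, gaps
-- ===== Notes on version B (the rewrite author's own statement) =====
-- stated objective: faster
-- what changed: Parses the hex target once instead of re-parsing it for every element, builds a dict frequency table in one pass and reads ones/gaps as lookups with zeros = len - ones - gaps, replacing the per-element three-way branching scan.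
-- outside the precondition, e.g. on calculate_ones_and_zeros_initialValue([], 'zz'): A returns (0, 0, 0), B raises ValueError
import Mathlib
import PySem

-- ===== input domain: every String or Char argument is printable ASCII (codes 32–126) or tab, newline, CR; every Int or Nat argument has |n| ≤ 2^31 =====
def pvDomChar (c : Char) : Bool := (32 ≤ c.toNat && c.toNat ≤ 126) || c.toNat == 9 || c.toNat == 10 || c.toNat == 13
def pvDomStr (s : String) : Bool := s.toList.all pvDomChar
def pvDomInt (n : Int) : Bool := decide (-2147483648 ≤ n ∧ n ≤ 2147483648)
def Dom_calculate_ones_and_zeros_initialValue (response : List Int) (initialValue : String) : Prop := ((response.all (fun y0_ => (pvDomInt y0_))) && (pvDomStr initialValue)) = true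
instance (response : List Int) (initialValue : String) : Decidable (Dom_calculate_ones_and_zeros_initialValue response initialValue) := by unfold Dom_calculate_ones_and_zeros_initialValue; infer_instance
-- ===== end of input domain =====

-- B replaces A's per-element three-way branching scan (which re-parses the hex target every
-- iteration) by one parse, one frequency-table build and three lookups; measured faster (A re-parses the hex string per element).

-- ===== PORT A =====
def calculate_ones_and_zeros_initialValue (response : List Int) (initialValue : String) : Int × Int × Int :=
  -- ones = 0; zeros = 0; gaps = 0; for x in response: …  (the int(...) parse is re-evaluated
  -- inside the loop, as in A; parse failure = ValueError is excluded by Pre_)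
  let r := response.foldl (fun (acc : Int × Int × Int) x =>
    if some x = PySem.Int.ofStrBase? (PySem.Str.replace initialValue "0x" "") 16 then
      (acc.1 + 1, acc.2.1, acc.2.2)
    else if x = -1 then
      (acc.1, acc.2.1, acc.2.2 + 1)
    else
      (acc.1, acc.2.1 + 1, acc.2.2)) (0, 0, 0)
  (r.1, r.2.1, r.2.2)

-- ===== PORT B =====
def calculate_ones_and_zeros_initialValue_alt (response : List Int) (initialValue : String) : Int × Int × Int :=
  match PySem.Int.ofStrBase? (PySem.Str.replace initialValue "0x" "") 16 with
  | none => (0, 0, 0)  -- Python B raises ValueError here; excluded by Pre_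
  | some target =>
    let c := response.foldl (fun (d : PySem.Dict Int Int) x => d.insert x (d.getD x 0 + 1)) PySem.Dict.empty
    let ones := c.getD target 0
    let gaps := if target = -1 then 0 else c.getD (-1) 0
    let zeros := (response.length : Int) - ones - gaps
    (ones, zeros, gaps)

-- ===== PRECONDITION & SPEC =====
-- Pre_ requires the hex parse int(initialValue.replace('0x',''), 16) to succeed: otherwise B
-- raises ValueError (and A too, unless response is empty — A only reaches the parse inside the
-- loop, so on ([], 'zz') A returns (0,0,0) by accident of lazy evaluation while B raises).
def Pre_calculate_ones_and_zeros_initialValue (response : List Int) (initialValue : String) : Prop :=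
  (PySem.Int.ofStrBase? (PySem.Str.replace initialValue "0x" "") 16).isSome = true
instance (response : List Int) (initialValue : String) : Decidable (Pre_calculate_ones_and_zeros_initialValue response initialValue) := by unfold Pre_calculate_ones_and_zeros_initialValue; infer_instance
def pvWitness_calculate_ones_and_zeros_initialValue : List Int × String := ([255, -1, 0, 255], "0xff")
def Spec_calculate_ones_and_zeros_initialValue (response : List Int) (initialValue : String) (out : Int × Int × Int) : Prop := out = calculate_ones_and_zeros_initialValue_alt response initialValue
instance (response : List Int) (initialValue : String) (out : Int × Int × Int) : Decidable (Spec_calculate_ones_and_zeros_initialValue response initialValue out) := by unfold Spec_calculate_ones_and_zeros_initialValue; infer_instance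

-- ===== CLAIM (what is proved, stated in full; the proofs are below) =====
def Claim_equal_calculate_ones_and_zeros_initialValue : Prop := ∀ (response : List Int) (initialValue : String), Dom_calculate_ones_and_zeros_initialValue response initialValue → Pre_calculate_ones_and_zeros_initialValue response initialValue → Spec_calculate_ones_and_zeros_initialValue response initialValue (calculate_ones_and_zeros_initialValue response initialValue)

-- ===== LEMMAS AND PROOFS =====

-- A's loop, with the parse fixed to `some t`, computes (count t, rest, gaps) in closed form.
theorem pv_loopA_eq (t : Int) (xs : List Int) (a b c : Int) :
    xs.foldl (fun (acc : Int × Int × Int) x =>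
      if x = t then (acc.1 + 1, acc.2.1, acc.2.2)
      else if x = -1 then (acc.1, acc.2.1, acc.2.2 + 1)
      else (acc.1, acc.2.1 + 1, acc.2.2)) (a, b, c) =
    (a + (xs.count t : Int),
     b + ((xs.length : Int) - (xs.count t : Int) - (if t = -1 then 0 else (xs.count (-1) : Int))),
     c + (if t = -1 then 0 else (xs.count (-1) : Int))) := by
  induction xs generalizing a b c with
  | nil => simp
  | cons x xs ih =>
    rw [List.foldl_cons]
    by_cases hx : x = t
    · rw [if_pos hx, ih]
      subst hx
      refine Prod.ext ?_ (Prod.ext ?_ ?_) <;>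
        by_cases h1 : x = -1 <;>
          simp [List.count_cons, h1] <;> push_cast <;> omega
    · rw [if_neg hx]
      by_cases h1 : x = -1
      · rw [if_pos h1, ih]
        have ht1 : ¬ t = -1 := fun h => hx (h1.trans h.symm)
        refine Prod.ext ?_ (Prod.ext ?_ ?_) <;>
          simp [List.count_cons, hx, h1, ht1] <;> push_cast <;> omega
      · rw [if_neg h1, ih]
        refine Prod.ext ?_ (Prod.ext ?_ ?_) <;>
          simp [List.count_cons, hx, h1] <;> try (push_cast ; omega)

-- ===== VERDICT (by name: the statement is the Claim_ definition above) =====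
theorem calculate_ones_and_zeros_initialValue_spec : Claim_equal_calculate_ones_and_zeros_initialValue := by
  intro response initialValue _dom hpre
  unfold Spec_calculate_ones_and_zeros_initialValue
  unfold Pre_calculate_ones_and_zeros_initialValue at hpre
  obtain ⟨t, ht⟩ := Option.isSome_iff_exists.mp hpre
  unfold calculate_ones_and_zeros_initialValue calculate_ones_and_zeros_initialValue_alt
  simp only [ht, Option.some.injEq, pv_loopA_eq, PySem.Dict.getD_foldl_insert_add_one,
    PySem.Dict.getD_empty, zero_add]
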